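-- pv_equiv track=rewrite | github.com/Tugcga/Homology | homology.py | _get_minimal_coordinates
-- ===== SOURCE A (Python) =====
-- def _get_minimal_coordinates(matrix, dim, min_row, min_colum):
--     to_return = (-1, -1)
--     min_value = 0
--     for i in range(min_row, dim[0]):
--         for j in range(min_colum, dim[1]):
--             v = abs(matrix[i][j])
--             if v != 0:
--                 if (min_value == 0 and v != 0) or (min_value != 0 and v < min_value):
--                     min_value = v
--                     to_return = (i, j)
--     return to_return
-- ===== SOURCE B (Python) =====
-- def _get_minimal_coordinates(matrix, dim, min_row, min_colum):
--     rows = range(min_row, dim[0])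
--     cols = range(min_colum, dim[1])
--     vals = [abs(matrix[i][j]) for i in rows for j in cols if matrix[i][j]]
--     if not vals:
--         return (-1, -1)
--     m = min(vals)
--     return next((i, j) for i in rows for j in cols if abs(matrix[i][j]) == m)
-- ===== Notes on version B (the rewrite author's own statement) =====
-- stated objective: alternative
-- what changed: Replaces A's single scan carrying a (position, min_value) accumulator by two staged passes: the first pass computes the minimal nonzero absolute value of the submatrix, a second independent search then returns the first coordinate (row-major) attaining it, which equals A's first-seen-minimum tie-break.
import Mathlib
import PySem

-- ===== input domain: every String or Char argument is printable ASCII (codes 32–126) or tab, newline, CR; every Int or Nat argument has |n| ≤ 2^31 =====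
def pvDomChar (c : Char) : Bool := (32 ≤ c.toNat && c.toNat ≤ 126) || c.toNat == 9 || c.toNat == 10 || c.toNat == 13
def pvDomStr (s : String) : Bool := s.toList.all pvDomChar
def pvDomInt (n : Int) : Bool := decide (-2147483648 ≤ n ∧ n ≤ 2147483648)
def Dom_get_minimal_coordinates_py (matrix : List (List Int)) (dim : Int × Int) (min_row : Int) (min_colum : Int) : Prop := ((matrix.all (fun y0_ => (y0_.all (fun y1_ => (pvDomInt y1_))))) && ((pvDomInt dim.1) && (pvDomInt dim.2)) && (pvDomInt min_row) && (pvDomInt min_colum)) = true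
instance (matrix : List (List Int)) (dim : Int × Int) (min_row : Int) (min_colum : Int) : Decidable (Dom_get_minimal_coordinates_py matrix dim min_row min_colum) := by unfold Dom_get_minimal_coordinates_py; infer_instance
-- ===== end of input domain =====

-- B replaces A's single scan with a (position, min_value) accumulator by two staged passes:
-- first compute the minimal nonzero absolute value, then search for the first coordinate attaining it
-- (alternative decomposition, same cost).

-- ===== PORT A =====
def get_minimal_coordinates_py (matrix : List (List Int)) (dim : Int × Int) (min_row : Int) (min_colum : Int) : Int × Int :=
  -- state = (to_return, min_value)
  let s := (PySem.List.pyRange min_row dim.1 1).foldl (fun s i =>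
    (PySem.List.pyRange min_colum dim.2 1).foldl (fun s j =>
      let v : Int := |PySem.List.pyGetD (PySem.List.pyGetD matrix i []) j 0|
      if v ≠ 0 then
        if (s.2 = 0 ∧ v ≠ 0) ∨ (s.2 ≠ 0 ∧ v < s.2) then ((i, j), v) else s
      else s) s) (((-1 : Int), (-1 : Int)), (0 : Int))
  s.1

-- ===== PORT B =====
def get_minimal_coordinates_py_alt (matrix : List (List Int)) (dim : Int × Int) (min_row : Int) (min_colum : Int) : Int × Int :=
  let rows := PySem.List.pyRange min_row dim.1 1
  let cols := PySem.List.pyRange min_colum dim.2 1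
  -- pass 1: the nonzero absolute values of the submatrix
  let vals : List Int := rows.flatMap (fun i => cols.filterMap (fun j =>
    let e := PySem.List.pyGetD (PySem.List.pyGetD matrix i []) j 0
    if e ≠ 0 then some |e| else none))
  match vals with
  | [] => (-1, -1)
  | c :: t =>
    let m := t.foldl min c          -- min(vals)
    -- pass 2: next((i,j) …): first coordinate with |entry| = m; m is attained, so the
    -- generator always yields — .getD only totalizes the never-taken none branch
    (rows.findSome? (fun i => cols.findSome? (fun j =>
      if |PySem.List.pyGetD (PySem.List.pyGetD matrix i []) j 0| == m then some (i, j)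
      else none))).getD (-1, -1)

-- ===== PRECONDITION & SPEC =====
-- Pre_ excludes exactly the inputs where A raises IndexError: some visited index pair is out of range.
-- (Stated as a short-circuiting Bool so it is decidable without enumerating an empty-or-invalid huge range.)
def Pre_get_minimal_coordinates_py (matrix : List (List Int)) (dim : Int × Int) (min_row : Int) (min_colum : Int) : Prop :=
  (decide (dim.1 ≤ min_row) || decide (dim.2 ≤ min_colum) ||
    (decide (-(matrix.length : Int) ≤ min_row) && decide (dim.1 ≤ (matrix.length : Int)) &&
      (PySem.List.pyRange min_row dim.1 1).all (fun i =>
        decide (-(((PySem.List.pyGetD matrix i []).length : Int)) ≤ min_colum) &&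
        decide (dim.2 ≤ (((PySem.List.pyGetD matrix i []).length : Int)))))) = true
instance (matrix : List (List Int)) (dim : Int × Int) (min_row : Int) (min_colum : Int) : Decidable (Pre_get_minimal_coordinates_py matrix dim min_row min_colum) := by unfold Pre_get_minimal_coordinates_py; infer_instance

def pvWitness_get_minimal_coordinates_py : List (List Int) × (Int × Int) × Int × Int := ([[0, 3], [2, 0]], (2, 2), 0, 0)

def Spec_get_minimal_coordinates_py (matrix : List (List Int)) (dim : Int × Int) (min_row : Int) (min_colum : Int) (out : Int × Int) : Prop := out = get_minimal_coordinates_py_alt matrix dim min_row min_colum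
instance (matrix : List (List Int)) (dim : Int × Int) (min_row : Int) (min_colum : Int) (out : Int × Int) : Decidable (Spec_get_minimal_coordinates_py matrix dim min_row min_colum out) := by unfold Spec_get_minimal_coordinates_py; infer_instance

-- ===== CLAIM (what is proved, stated in full; the proofs are below) =====
def Claim_equal_get_minimal_coordinates_py : Prop := ∀ (matrix : List (List Int)) (dim : Int × Int) (min_row : Int) (min_colum : Int), Dom_get_minimal_coordinates_py matrix dim min_row min_colum → Pre_get_minimal_coordinates_py matrix dim min_row min_colum → Spec_get_minimal_coordinates_py matrix dim min_row min_colum (get_minimal_coordinates_py matrix dim min_row min_colum)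

-- ===== LEMMAS AND PROOFS =====

theorem pvWitness_holds :
    Dom_get_minimal_coordinates_py pvWitness_get_minimal_coordinates_py.1 pvWitness_get_minimal_coordinates_py.2.1 pvWitness_get_minimal_coordinates_py.2.2.1 pvWitness_get_minimal_coordinates_py.2.2.2 ∧
    Pre_get_minimal_coordinates_py pvWitness_get_minimal_coordinates_py.1 pvWitness_get_minimal_coordinates_py.2.1 pvWitness_get_minimal_coordinates_py.2.2.1 pvWitness_get_minimal_coordinates_py.2.2.2 := by
  constructor <;> decide

-- A's effective step on a candidate triple (value, position)
def pvAStep (s : (Int × Int) × Int) (x : Int × Int × Int) : (Int × Int) × Int :=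
  if (s.2 = 0 ∧ x.1 ≠ 0) ∨ (s.2 ≠ 0 ∧ x.1 < s.2) then (x.2, x.1) else s

-- the (value, position) triples of the nonzero entries, in scan order
def pvCands (matrix : List (List Int)) (dim : Int × Int) (min_row : Int) (min_colum : Int) : List (Int × Int × Int) :=
  (PySem.List.pyRange min_row dim.1 1).flatMap (fun i =>
    (PySem.List.pyRange min_colum dim.2 1).filterMap (fun j =>
      let e := PySem.List.pyGetD (PySem.List.pyGetD matrix i []) j 0
      if e ≠ 0 then some (|e|, i, j) else none))

theorem pvCands_pos (matrix : List (List Int)) (dim : Int × Int) (min_row min_colum : Int) :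
    ∀ x ∈ pvCands matrix dim min_row min_colum, 0 < x.1 := by
  intro x hx
  simp only [pvCands, List.mem_flatMap, List.mem_filterMap] at hx
  obtain ⟨i, _, j, _, hj⟩ := hx
  by_cases h : PySem.List.pyGetD (PySem.List.pyGetD matrix i []) j 0 = 0
  · simp [h] at hj
  · simp only [h, ne_eq, not_false_eq_true, if_pos] at hj
    cases hj
    simpa using abs_pos.mpr h

-- the double loop of A equals the fold of pvAStep over the candidate list
theorem pvA_eq_fold (matrix : List (List Int)) (dim : Int × Int) (min_row min_colum : Int)
    (s : (Int × Int) × Int) :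
    (PySem.List.pyRange min_row dim.1 1).foldl (fun s i =>
      (PySem.List.pyRange min_colum dim.2 1).foldl (fun s j =>
        let v : Int := |PySem.List.pyGetD (PySem.List.pyGetD matrix i []) j 0|
        if v ≠ 0 then
          if (s.2 = 0 ∧ v ≠ 0) ∨ (s.2 ≠ 0 ∧ v < s.2) then ((i, j), v) else s
        else s) s) s
    = (pvCands matrix dim min_row min_colum).foldl pvAStep s := by
  unfold pvCands
  rw [List.foldl_flatMap]
  refine List.foldl_ext _ _ s (fun s' i _ => ?_)
  rw [List.foldl_filterMap]
  refine List.foldl_ext _ _ s' (fun s'' j _ => ?_)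
  by_cases h : PySem.List.pyGetD (PySem.List.pyGetD matrix i []) j 0 = 0
  · simp [h]
  · simp only [h, ne_eq, not_false_eq_true, if_pos]
    simp [pvAStep, abs_ne_zero.mpr h]

-- B's value list is the first projection of the candidate list
theorem pvVals_eq_map (matrix : List (List Int)) (dim : Int × Int) (min_row min_colum : Int) :
    (PySem.List.pyRange min_row dim.1 1).flatMap (fun i =>
      (PySem.List.pyRange min_colum dim.2 1).filterMap (fun j =>
        let e := PySem.List.pyGetD (PySem.List.pyGetD matrix i []) j 0
        if e ≠ 0 then some |e| else none))
    = (pvCands matrix dim min_row min_colum).map (·.1) := by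
  unfold pvCands
  rw [List.map_flatMap]
  refine List.flatMap_congr (fun i _ => ?_)
  rw [List.map_filterMap]
  refine List.filterMap_congr (fun j _ => ?_)
  by_cases h : PySem.List.pyGetD (PySem.List.pyGetD matrix i []) j 0 = 0 <;> simp [h]

-- running minimum of the first components, seeded with v
def pvMinV (l : List (Int × Int × Int)) (v : Int) : Int := l.foldl (fun a y => min a y.1) v

theorem pvMinV_le (l : List (Int × Int × Int)) : ∀ v, pvMinV l v ≤ v := by
  induction l with
  | nil => intro v; simp [pvMinV]
  | cons x t ih =>
    intro v
    calc pvMinV (x :: t) v = pvMinV t (min v x.1) := rfl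
    _ ≤ min v x.1 := ih _
    _ ≤ v := min_le_left _ _

theorem pvMinV_pos (l : List (Int × Int × Int)) : ∀ v, 0 < v → (∀ x ∈ l, 0 < x.1) →
    0 < pvMinV l v := by
  induction l with
  | nil => intro v hv _; simpa [pvMinV] using hv
  | cons x t ih =>
    intro v hv hl
    exact ih (min v x.1) (lt_min hv (hl x (by simp))) (fun y hy => hl y (by simp [hy]))

theorem pvMinV_attained (l : List (Int × Int × Int)) : ∀ v, pvMinV l v ≠ v →
    ∃ x ∈ l, x.1 = pvMinV l v := by
  induction l with
  | nil => intro v h; simp [pvMinV] at h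
  | cons x t ih =>
    intro v h
    have hM : pvMinV (x :: t) v = pvMinV t (min v x.1) := rfl
    by_cases he : pvMinV t (min v x.1) = min v x.1
    · rcases le_or_gt v x.1 with hle | hlt
      · exfalso; apply h; rw [hM, he, min_eq_left hle]
      · exact ⟨x, by simp, by rw [hM, he, min_eq_right hlt.le]⟩
    · obtain ⟨y, hy, hy1⟩ := ih (min v x.1) he
      exact ⟨y, by simp [hy], by rw [hM]; exact hy1⟩

-- characterization of A's fold from a positive state: the position of the first strict
-- improvement to the overall minimum (if any), else the state unchanged
theorem pvFoldA_char (l : List (Int × Int × Int)) : ∀ (p : Int × Int) (v : Int), 0 < v →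
    (∀ x ∈ l, 0 < x.1) →
    l.foldl pvAStep (p, v) =
      (match l.find? (fun x => x.1 == pvMinV l v) with
       | none => (p, v)
       | some x => if x.1 < v then (x.2, x.1) else (p, v)) := by
  induction l with
  | nil => intro p v _ _; simp
  | cons x t ih =>
    intro p v hv hl
    have hx : 0 < x.1 := hl x (by simp)
    have hM : pvMinV (x :: t) v = pvMinV t (min v x.1) := rfl
    by_cases hlt : x.1 < v
    · -- x is taken
      have hstep : pvAStep (p, v) x = (x.2, x.1) := by
        simp only [pvAStep]; rw [if_pos]; right; constructor <;> omega
      have hmin : min v x.1 = x.1 := min_eq_right hlt.le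
      have hMeq : pvMinV (x :: t) v = pvMinV t x.1 := by rw [hM, hmin]
      rw [List.foldl_cons, hstep,
        ih x.2 x.1 hx (fun y hy => hl y (by simp [hy]))]
      by_cases hxm : x.1 = pvMinV (x :: t) v
      · -- x itself achieves the minimum
        have hfind : (x :: t).find? (fun y => y.1 == pvMinV (x :: t) v) = some x := by
          rw [List.find?_cons_of_pos]; simpa using hxm
        rw [hfind]
        -- inner find over t: any hit has value = min ≥ ... = x.1, not < x.1
        rcases hfind' : t.find? (fun y => y.1 == pvMinV t x.1) with _ | y
        · simp [hfind', hlt]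
        · have hy1 : y.1 = pvMinV t x.1 := by
            have := List.find?_some hfind'; simpa using this
          have hny : ¬ y.1 < x.1 := by rw [hy1, ← hMeq, ← hxm]; omega
          simp [hfind', hny, hlt]
      · -- minimum is strictly below x.1, attained in t
        have hmlt : pvMinV t x.1 < x.1 :=
          lt_of_le_of_ne (by simpa [hMeq] using (pvMinV_le t x.1)) (by rw [← hMeq]; exact fun h => hxm h.symm)
        have hfind : (x :: t).find? (fun y => y.1 == pvMinV (x :: t) v)
            = t.find? (fun y => y.1 == pvMinV (x :: t) v) := by
          rw [List.find?_cons_of_neg]; simpa using hxm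
        rw [hfind, hMeq]
        rcases hfind' : t.find? (fun y => y.1 == pvMinV t x.1) with _ | y
        · -- impossible: the minimum is attained in t
          obtain ⟨y, hy, hy1⟩ := pvMinV_attained t x.1 (ne_of_lt hmlt)
          have hs : (t.find? (fun y => y.1 == pvMinV t x.1)).isSome := by
            rw [List.find?_isSome]; exact ⟨y, hy, by simpa using hy1⟩
          rw [hfind'] at hs; simp at hs
        · have hy1 : y.1 = pvMinV t x.1 := by
            have := List.find?_some hfind'; simpa using this
          have h1 : y.1 < x.1 := by rw [hy1]; exact hmlt
          have h2 : y.1 < v := h1.trans hlt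
          simp [hfind', h1, h2]
    · -- x is skipped
      have hstep : pvAStep (p, v) x = (p, v) := by
        simp only [pvAStep]; rw [if_neg]; omega
      have hmin : min v x.1 = v := min_eq_left (by omega)
      have hMeq : pvMinV (x :: t) v = pvMinV t v := by rw [hM, hmin]
      rw [List.foldl_cons, hstep, ih p v hv (fun y hy => hl y (by simp [hy])), hMeq]
      by_cases hxm : x.1 = pvMinV t v
      · -- then x.1 ≤ v and pvMinV ≤ v forces x.1 = v, both sides give (p, v)
        have hxv : x.1 = v := le_antisymm (hxm ▸ pvMinV_le t v) (by omega)
        have hfind : (x :: t).find? (fun y => y.1 == pvMinV t v) = some x := by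
          rw [List.find?_cons_of_pos]; simpa using hxm
        rw [hfind]
        have hnx : ¬ x.1 < v := by omega
        rcases hfind' : t.find? (fun y => y.1 == pvMinV t v) with _ | y
        · simp [hfind', hnx]
        · have hy1 : y.1 = pvMinV t v := by
            have := List.find?_some hfind'; simpa using this
          have hny : ¬ y.1 < v := by rw [hy1, ← hxm, hxv]; omega
          simp [hfind', hny, hnx]
      · have hfind : (x :: t).find? (fun y => y.1 == pvMinV t v)
            = t.find? (fun y => y.1 == pvMinV t v) := by
          rw [List.find?_cons_of_neg]; simpa using hxm
        rw [hfind]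

-- B's second pass equals (first candidate with value m).2, for positive m
theorem pvRow_find (cols : List Int) (matrix : List (List Int)) (i m : Int) (hm : 0 < m) :
    cols.findSome? (fun j =>
        if |PySem.List.pyGetD (PySem.List.pyGetD matrix i []) j 0| == m then some (i, j) else none)
    = ((cols.filterMap (fun j =>
        let e := PySem.List.pyGetD (PySem.List.pyGetD matrix i []) j 0
        if e ≠ 0 then some (|e|, i, j) else none)).find? (fun x => x.1 == m)).map (·.2) := by
  induction cols with
  | nil => simp
  | cons j t ih =>
    rw [List.findSome?_cons, List.filterMap_cons]
    by_cases h : PySem.List.pyGetD (PySem.List.pyGetD matrix i []) j 0 = 0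
    · have hb : ((0 : Int) == m) = false := by
        simpa using (by omega : ¬ (0 : Int) = m)
      simp only [h, abs_zero, hb, Bool.false_eq_true, if_false, ne_eq, not_true_eq_false]
      exact ih
    · simp only [h, ne_eq, not_false_eq_true, if_pos]
      rcases hb : (|PySem.List.pyGetD (PySem.List.pyGetD matrix i []) j 0| == m) with _ | _
      · rw [List.find?_cons_of_neg]
        · simp only [Bool.false_eq_true, if_false]
          exact ih
        · simpa using hb
      · rw [List.find?_cons_of_pos]
        · simp
        · simpa using hb

theorem pvGrid_find (matrix : List (List Int)) (dim : Int × Int) (min_row min_colum m : Int)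
    (hm : 0 < m) :
    (PySem.List.pyRange min_row dim.1 1).findSome? (fun i =>
      (PySem.List.pyRange min_colum dim.2 1).findSome? (fun j =>
        if |PySem.List.pyGetD (PySem.List.pyGetD matrix i []) j 0| == m then some (i, j) else none))
    = ((pvCands matrix dim min_row min_colum).find? (fun x => x.1 == m)).map (·.2) := by
  unfold pvCands
  induction PySem.List.pyRange min_row dim.1 1 with
  | nil => simp
  | cons i t ih =>
    rw [List.findSome?_cons, List.flatMap_cons, List.find?_append,
      pvRow_find _ matrix i m hm]
    rcases hrow : ((PySem.List.pyRange min_colum dim.2 1).filterMap (fun j =>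
        let e := PySem.List.pyGetD (PySem.List.pyGetD matrix i []) j 0
        if e ≠ 0 then some (|e|, i, j) else none)).find? (fun x => x.1 == m) with _ | y
    · rw [hrow]
      simp only [Option.map_none, Option.none_or]
      exact ih
    · rw [hrow]
      simp only [Option.map_some, Option.some_or]

-- ===== VERDICT (by name: the statement is the Claim_ definition above) =====
theorem get_minimal_coordinates_py_spec : Claim_equal_get_minimal_coordinates_py := by
  intro matrix dim min_row min_colum _ _
  unfold Spec_get_minimal_coordinates_py get_minimal_coordinates_py get_minimal_coordinates_py_alt
  simp only []
  rw [pvA_eq_fold, pvVals_eq_map]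
  have hpos := pvCands_pos matrix dim min_row min_colum
  rcases hc : pvCands matrix dim min_row min_colum with _ | ⟨d, u⟩
  · simp
  · rw [hc] at hpos
    have hd : 0 < d.1 := hpos d (by simp)
    have hupos : ∀ x ∈ u, 0 < x.1 := fun y hy => hpos y (by simp [hy])
    -- B's m equals pvMinV u d.1
    have hmfold : (u.map (·.1)).foldl min d.1 = pvMinV u d.1 := by
      simp [pvMinV, List.foldl_map]
    have hmpos : 0 < pvMinV u d.1 := pvMinV_pos u d.1 hd hupos
    simp only [List.map_cons, List.foldl_cons, hmfold]
    rw [pvGrid_find matrix dim min_row min_colum _ hmpos, hc]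
    -- A's side: first step takes d, then pvFoldA_char
    have hstep : pvAStep (((-1 : Int), (-1 : Int)), (0 : Int)) d = (d.2, d.1) := by
      simp only [pvAStep]; rw [if_pos (Or.inl ⟨trivial, by omega⟩)]
    rw [hstep, pvFoldA_char u d.2 d.1 hd hupos]
    by_cases hdm : d.1 = pvMinV u d.1
    · -- head achieves the minimum: B finds d; A keeps (d.2, d.1)
      have hfind : (d :: u).find? (fun x => x.1 == pvMinV u d.1) = some d := by
        rw [List.find?_cons_of_pos]; simpa using hdm
      rw [hfind]
      rcases hfind' : u.find? (fun x => x.1 == pvMinV u d.1) with _ | y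
      · simp [hfind']
      · have hy1 : y.1 = pvMinV u d.1 := by
          have := List.find?_some hfind'; simpa using this
        have hny : ¬ y.1 < d.1 := by rw [hy1, ← hdm]; omega
        simp [hfind', hny]
    · -- minimum is strictly below d.1: both give the first element of u attaining it
      have hmlt : pvMinV u d.1 < d.1 := lt_of_le_of_ne (pvMinV_le u d.1) (fun h => hdm h.symm)
      have hfind : (d :: u).find? (fun x => x.1 == pvMinV u d.1)
          = u.find? (fun x => x.1 == pvMinV u d.1) := by
        rw [List.find?_cons_of_neg]; simpa using hdm
      rw [hfind]
      obtain ⟨y, hy, hy1⟩ := pvMinV_attained u d.1 (fun h => hdm h.symm)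
      have hsome : (u.find? (fun x => x.1 == pvMinV u d.1)).isSome := by
        rw [List.find?_isSome]; exact ⟨y, hy, by simpa using hy1⟩
      rcases hfind' : u.find? (fun x => x.1 == pvMinV u d.1) with _ | z
      · rw [hfind'] at hsome; simp at hsome
      · have hz1 : z.1 = pvMinV u d.1 := by
          have := List.find?_some hfind'; simpa using this
        have hzlt : z.1 < d.1 := by rw [hz1]; exact hmlt
        simp [hfind', hzlt]
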